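-- pv_equiv track=rewrite | github.com/MattJtz/ITU_Chatbot | ITU_Chatbot/ITU_Chatbot.py | annotate_code
-- ===== SOURCE A (Python) =====
-- def annotate_code(file_content, errors):
--     annotated_code = []
--     lines = file_content.split('\n')
--     error_lines = {int(e.split(':')[0]): e.split(':')[1].strip() for e in errors if ':' in e and e.split(':')[0].isdigit()}
--
--     for i, line in enumerate(lines):
--         if i + 1 in error_lines:
--             annotated_code.append(f"{line}  # Error: {error_lines[i + 1]}")
--         else:
--             annotated_code.append(line)
--
--     return '\n'.join(annotated_code)
-- ===== SOURCE B (Python) =====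
-- def annotate_code(file_content, errors):
--     lines = file_content.split('\n')
--     out = list(lines)
--     n = len(lines)
--     for e in errors:
--         if ':' in e:
--             parts = e.split(':')
--             if parts[0].isdigit():
--                 k = int(parts[0])
--                 if 1 <= k <= n:
--                     out[k - 1] = lines[k - 1] + "  # Error: " + parts[1].strip()
--     return '\n'.join(out)
-- ===== Notes on version B (the rewrite author's own statement) =====
-- stated objective: alternative
-- what changed: Instead of building a line-number dict and scanning every line for membership, B iterates over the errors themselves and overwrites the affected slots of an indexed copy of the lines (duplicates overwrite, matching dict last-wins).
import Mathlib
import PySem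

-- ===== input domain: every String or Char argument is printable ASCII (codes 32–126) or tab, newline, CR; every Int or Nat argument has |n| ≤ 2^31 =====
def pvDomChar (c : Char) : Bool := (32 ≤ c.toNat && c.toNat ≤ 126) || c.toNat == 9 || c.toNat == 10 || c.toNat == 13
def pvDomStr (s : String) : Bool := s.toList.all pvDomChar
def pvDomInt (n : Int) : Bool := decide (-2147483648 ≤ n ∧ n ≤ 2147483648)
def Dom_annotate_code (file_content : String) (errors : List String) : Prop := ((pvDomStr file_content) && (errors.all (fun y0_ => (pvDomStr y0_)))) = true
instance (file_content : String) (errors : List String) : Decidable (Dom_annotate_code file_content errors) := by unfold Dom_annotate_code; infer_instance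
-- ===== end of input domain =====

-- B iterates over the errors and overwrites slots of an indexed copy of the lines,
-- instead of building a line-number dict and scanning every line (alternative decomposition, same cost).

-- ===== PORT A =====
def pvParts (e : String) : List String := (PySem.Str.split? e ":").getD []   -- e.split(':'): the separator is nonempty, so split? is always some

def annotate_code (file_content : String) (errors : List String) : String :=
  let lines := (PySem.Str.split? file_content "\n").getD []   -- file_content.split('\n'): nonempty separator, always some
  -- {int(e.split(':')[0]): e.split(':')[1].strip() for e in errors if ':' in e and e.split(':')[0].isdigit()}
  let error_lines : PySem.Dict Int String :=
    errors.foldl (fun d e =>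
      if PySem.Str.isIn ":" e && PySem.Str.strIsdigit (PySem.List.pyGetD (pvParts e) 0 "") then
        match PySem.Int.ofStr? (PySem.List.pyGetD (pvParts e) 0 "") with
        | some k => d.insert k (PySem.Str.strip (PySem.List.pyGetD (pvParts e) 1 ""))
        | none => d      -- unreachable: the guard ensures an ASCII digit string
      else d) PySem.Dict.empty
  let annotated_code : List String :=
    (PySem.List.enumerate lines 0).foldl (fun acc p =>
      match error_lines.get? (p.1 + 1) with   -- 'if i + 1 in error_lines' then look it up
      | some m => acc ++ [p.2 ++ "  # Error: " ++ m]
      | none => acc ++ [p.2]) []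
  PySem.Str.join "\n" annotated_code

-- ===== PORT B =====
def annotate_code_alt (file_content : String) (errors : List String) : String :=
  let lines := (PySem.Str.split? file_content "\n").getD []   -- nonempty separator, always some
  let n : Int := lines.length
  let out := errors.foldl (fun out e =>
    if PySem.Str.isIn ":" e then
      let parts := pvParts e
      if PySem.Str.strIsdigit (PySem.List.pyGetD parts 0 "") then
        match PySem.Int.ofStr? (PySem.List.pyGetD parts 0 "") with
        | some k =>
          if 1 ≤ k ∧ k ≤ n then
            out.set (k - 1).toNat   -- out[k-1] = lines[k-1] + "  # Error: " + parts[1].strip(); in range since 1 ≤ k ≤ n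
              (PySem.List.pyGetD lines (k - 1) "" ++ "  # Error: " ++ PySem.Str.strip (PySem.List.pyGetD parts 1 ""))
          else out
        | none => out   -- unreachable: the guard ensures an ASCII digit string
      else out
    else out) lines
  PySem.Str.join "\n" out

-- ===== PRECONDITION & SPEC =====
def Spec_annotate_code (file_content : String) (errors : List String) (out : String) : Prop := out = annotate_code_alt file_content errors
instance (file_content : String) (errors : List String) (out : String) : Decidable (Spec_annotate_code file_content errors out) := by unfold Spec_annotate_code; infer_instance

-- ===== CLAIM (what is proved, stated in full; the proofs are below) =====
def Claim_equal_annotate_code : Prop := ∀ (file_content : String) (errors : List String), Dom_annotate_code file_content errors → Spec_annotate_code file_content errors (annotate_code file_content errors)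

-- ===== LEMMAS AND PROOFS =====

-- the value line i must carry after processing: its original text, annotated iff the dict maps i+1
def pvG (lines : List String) (d : PySem.Dict Int String) (i : Nat) : String :=
  match d.get? ((i : Int) + 1) with
  | some m => lines.getD i "" ++ "  # Error: " ++ m
  | none => lines.getD i ""

-- A's dict-building step, named
def pvStepA (d : PySem.Dict Int String) (e : String) : PySem.Dict Int String :=
  if PySem.Str.isIn ":" e && PySem.Str.strIsdigit (PySem.List.pyGetD (pvParts e) 0 "") then
    match PySem.Int.ofStr? (PySem.List.pyGetD (pvParts e) 0 "") with
    | some k => d.insert k (PySem.Str.strip (PySem.List.pyGetD (pvParts e) 1 ""))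
    | none => d
  else d

-- B's list-overwriting step, named
def pvStepB (lines : List String) (e : String) (out : List String) : List String :=
  if PySem.Str.isIn ":" e then
    if PySem.Str.strIsdigit (PySem.List.pyGetD (pvParts e) 0 "") then
      match PySem.Int.ofStr? (PySem.List.pyGetD (pvParts e) 0 "") with
      | some k =>
        if 1 ≤ k ∧ k ≤ (lines.length : Int) then
          out.set (k - 1).toNat
            (PySem.List.pyGetD lines (k - 1) "" ++ "  # Error: " ++ PySem.Str.strip (PySem.List.pyGetD (pvParts e) 1 ""))
        else out
      | none => out
    else out
  else out

-- one error processed on each side preserves the invariant "slot i holds pvG lines d i"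
lemma pvStep_inv (lines : List String) (e : String) (d : PySem.Dict Int String) (out : List String)
    (hlen : out.length = lines.length)
    (hinv : ∀ i, i < lines.length → out.getD i "" = pvG lines d i) :
    (pvStepB lines e out).length = lines.length ∧
      ∀ i, i < lines.length → (pvStepB lines e out).getD i "" = pvG lines (pvStepA d e) i := by
  unfold pvStepB pvStepA
  rcases hin : PySem.Str.isIn ":" e with _ | _
  · simp only [Bool.false_and, Bool.false_eq_true, if_false]
    exact ⟨hlen, hinv⟩
  · rcases hdig : PySem.Str.strIsdigit (PySem.List.pyGetD (pvParts e) 0 "") with _ | _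
    · simp only [Bool.and_false, Bool.false_eq_true, if_false, if_true]
      exact ⟨hlen, hinv⟩
    · simp only [Bool.and_self, if_true]
      rcases hk : PySem.Int.ofStr? (PySem.List.pyGetD (pvParts e) 0 "") with _ | k
      · exact ⟨hlen, hinv⟩
      · simp only [hk]
        set msg := PySem.Str.strip (PySem.List.pyGetD (pvParts e) 1 "") with hmsg
        by_cases hr : 1 ≤ k ∧ k ≤ (lines.length : Int)
        · rw [if_pos hr]
          refine ⟨by simpa using hlen, ?_⟩
          intro i hi
          rw [pvG, PySem.Dict.get?_insert]
          by_cases hik : i = (k - 1).toNat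
          · subst hik
            rw [if_pos (by omega)]
            rw [List.getD_eq_getElem?_getD, List.getElem?_set_self (by omega), Option.getD_some,
              PySem.List.pyGetD_of_nonneg lines "" (by omega), List.getD_eq_getElem?_getD]
          · rw [if_neg (by omega)]
            rw [List.getD_eq_getElem?_getD, List.getElem?_set_ne (by omega), ← List.getD_eq_getElem?_getD,
              hinv i hi, pvG]
        · rw [if_neg hr]
          refine ⟨hlen, fun i hi => ?_⟩
          rw [hinv i hi, pvG, pvG, PySem.Dict.get?_insert, if_neg (by omega)]

-- the invariant carried through the whole error list
lemma pvFold_inv (lines : List String) (es : List String) (d : PySem.Dict Int String) (out : List String)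
    (hlen : out.length = lines.length)
    (hinv : ∀ i, i < lines.length → out.getD i "" = pvG lines d i) :
    (es.foldl (fun o e => pvStepB lines e o) out).length = lines.length ∧
      ∀ i, i < lines.length →
        (es.foldl (fun o e => pvStepB lines e o) out).getD i "" = pvG lines (es.foldl pvStepA d) i := by
  induction es generalizing d out with
  | nil => exact ⟨hlen, hinv⟩
  | cons e es ih =>
    obtain ⟨h1, h2⟩ := pvStep_inv lines e d out hlen hinv
    exact ih (pvStepA d e) (pvStepB lines e out) h1 h2

-- A's enumerate loop is pvG mapped over the indices
lemma pvA_map (lines : List String) (d : PySem.Dict Int String) :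
    (PySem.List.enumerate lines 0).foldl (fun acc p =>
      match d.get? (p.1 + 1) with
      | some m => acc ++ [p.2 ++ "  # Error: " ++ m]
      | none => acc ++ [p.2]) [] =
    (List.range lines.length).map (pvG lines d) := by
  have hstep : (PySem.List.enumerate lines 0).foldl (fun acc p =>
      match d.get? (p.1 + 1) with
      | some m => acc ++ [p.2 ++ "  # Error: " ++ m]
      | none => acc ++ [p.2]) [] =
      (PySem.List.enumerate lines 0).foldl (fun acc p => acc ++
        [match d.get? (p.1 + 1) with
         | some m => p.2 ++ "  # Error: " ++ m
         | none => p.2]) [] := by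
    apply PySem.List.foldl_congr_mem
    intro acc p _
    rcases d.get? (p.1 + 1) with _ | m <;> rfl
  rw [hstep, PySem.List.foldl_append_singleton_eq_map, List.nil_append]
  apply List.ext_getElem
  · simp [PySem.List.length_enumerate]
  · intro i h1 h2
    simp only [List.getElem_map, PySem.List.getElem_enumerate, List.getElem_range]
    rw [pvG, zero_add]
    have h3 : i < lines.length := by simpa [PySem.List.length_enumerate] using h1
    have hgd : lines.getD i "" = lines[i]'(by simpa [PySem.List.length_enumerate] using h1) := by
      rw [List.getD_eq_getElem?_getD, List.getElem?_eq_getElem, Option.getD_some]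
    rcases d.get? ((i : Int) + 1) with _ | m <;>
      simp [hgd, List.getD_eq_getElem?_getD, List.getElem?_eq_getElem h3]

-- ===== VERDICT (by name: the statement is the Claim_ definition above) =====
theorem annotate_code_spec : Claim_equal_annotate_code := by
  intro fc errors _
  unfold Spec_annotate_code annotate_code annotate_code_alt
  set lines := (PySem.Str.split? fc "\n").getD [] with hlines
  have hA : errors.foldl (fun d e =>
      if PySem.Str.isIn ":" e && PySem.Str.strIsdigit (PySem.List.pyGetD (pvParts e) 0 "") then
        match PySem.Int.ofStr? (PySem.List.pyGetD (pvParts e) 0 "") with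
        | some k => d.insert k (PySem.Str.strip (PySem.List.pyGetD (pvParts e) 1 ""))
        | none => d
      else d) PySem.Dict.empty = errors.foldl pvStepA PySem.Dict.empty := rfl
  have hB : errors.foldl (fun out e =>
    if PySem.Str.isIn ":" e then
      if PySem.Str.strIsdigit (PySem.List.pyGetD (pvParts e) 0 "") then
        match PySem.Int.ofStr? (PySem.List.pyGetD (pvParts e) 0 "") with
        | some k =>
          if 1 ≤ k ∧ k ≤ (lines.length : Int) then
            out.set (k - 1).toNat
              (PySem.List.pyGetD lines (k - 1) "" ++ "  # Error: " ++ PySem.Str.strip (PySem.List.pyGetD (pvParts e) 1 ""))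
          else out
        | none => out
      else out
    else out) lines = errors.foldl (fun o e => pvStepB lines e o) lines := rfl
  simp only [hA, hB]
  congr 1
  obtain ⟨hlen, hinv⟩ := pvFold_inv lines errors PySem.Dict.empty lines rfl
    (fun i hi => by rw [pvG, PySem.Dict.get?_empty])
  rw [pvA_map]
  apply List.ext_getElem
  · simpa using hlen.symm
  · intro i h1 h2
    have h3 : i < lines.length := by simpa using h1
    rw [List.getElem_map, List.getElem_range]
    rw [← hinv i h3, List.getD_eq_getElem?_getD, List.getElem?_eq_getElem h2, Option.getD_some]
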